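-- pv_equiv track=rewrite | github.com/VidhyaPonnusamy-gce/Mount-Blue-job-challenge-codes | Mount-blue-sec12-4.py | sansaXor
-- ===== SOURCE A (Python) =====
-- def sansaXor(arr):
--     n=len(arr)
--     result=0
--     for i in range(n):
--         count=(i+1)*(n-i)
--         if count%2!=0:
--             result^=arr[i]
--     return result
-- ===== SOURCE B (Python) =====
-- def sansaXor(arr):
--     # (i+1)*(len(arr)-i) is odd only when i is even and len(arr) is odd,
--     # so: even-length arrays contribute nothing; otherwise XOR the even-index elements.
--     if len(arr) % 2 == 0:
--         return 0
--     result = 0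
--     for i in range(0, len(arr), 2):
--         result ^= arr[i]
--     return result
-- ===== Notes on version B (the rewrite author's own statement) =====
-- stated objective: simpler
-- what changed: B replaces A's per-index product-and-parity test with a single length-parity early return (even length -> 0) and a stride-2 loop XORing only the even-index elements; no count is ever computed.
import Mathlib
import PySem

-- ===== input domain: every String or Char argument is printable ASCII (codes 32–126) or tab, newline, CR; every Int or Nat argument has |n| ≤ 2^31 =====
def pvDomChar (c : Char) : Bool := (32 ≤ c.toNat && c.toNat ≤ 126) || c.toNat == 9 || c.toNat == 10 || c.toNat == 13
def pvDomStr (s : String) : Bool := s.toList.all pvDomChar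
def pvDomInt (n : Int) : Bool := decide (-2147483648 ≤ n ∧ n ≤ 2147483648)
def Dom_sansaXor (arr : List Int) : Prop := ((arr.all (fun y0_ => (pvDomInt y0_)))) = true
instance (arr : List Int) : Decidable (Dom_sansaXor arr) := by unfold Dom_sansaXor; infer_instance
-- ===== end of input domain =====

-- B replaces A's per-index product-and-parity test with a length-parity early return plus a stride-2 loop over even indices (simpler).

-- ===== PORT A =====
def sansaXor (arr : List Int) : Int :=
  let n := PySem.List.len arr
  (PySem.List.pyRange 0 n 1).foldl
    (fun result i =>
      let count := (i + 1) * (n - i)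
      if PySem.Int.mod count 2 ≠ 0 then PySem.Int.bxor result (PySem.List.pyGetD arr i 0)
      else result) 0

-- ===== PORT B =====
def sansaXor_alt (arr : List Int) : Int :=
  if PySem.Int.mod (PySem.List.len arr) 2 = 0 then 0
  else
    (PySem.List.pyRange 0 (PySem.List.len arr) 2).foldl
      (fun result i => PySem.Int.bxor result (PySem.List.pyGetD arr i 0)) 0

-- ===== PRECONDITION & SPEC =====
def Spec_sansaXor (arr : List Int) (out : Int) : Prop := out = sansaXor_alt arr
instance (arr : List Int) (out : Int) : Decidable (Spec_sansaXor arr out) := by unfold Spec_sansaXor; infer_instance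

-- ===== CLAIM (what is proved, stated in full; the proofs are below) =====
def Claim_equal_sansaXor : Prop := ∀ (arr : List Int), Dom_sansaXor arr → Spec_sansaXor arr (sansaXor arr)

-- ===== LEMMAS AND PROOFS =====

theorem pv_mod_two (a : Int) : PySem.Int.mod a 2 = a % 2 := by
  show a.fmod 2 = a % 2
  rw [Int.fmod_eq_emod]; simp

-- A's count (i+1)*(n-i) is odd exactly when the index is even and the length is odd
theorem pv_parity (L k : Nat) (hk : k < L) :
    ((((k : Int)) + 1) * ((L : Int) - (k : Int))) % 2 = 0 ↔ (k % 2 = 1 ∨ L % 2 = 0) := by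
  have h1 : (((k : Int)) + 1) * ((L : Int) - (k : Int)) = (((k + 1) * (L - k) : Nat) : Int) := by
    push_cast [Nat.cast_sub hk.le]; ring
  rw [h1]
  have h2 : ((((k + 1) * (L - k) : Nat)) : Int) % 2 = ((((k + 1) * (L - k)) % 2 : Nat) : Int) := by
    push_cast; ring
  rw [h2]
  have h3 := Nat.mul_mod (k + 1) (L - k) 2
  rcases Nat.mod_two_eq_zero_or_one (k + 1) with h4 | h4 <;>
    rcases Nat.mod_two_eq_zero_or_one (L - k) with h5 | h5 <;>
      simp [h4, h5] at h3 <;> omega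

-- a guarded xor-fold is the fold over the filtered list
theorem pv_foldl_if_filter (l : List Nat) (p : Nat → Prop) [DecidablePred p]
    (g : Nat → Int) (init : Int) :
    l.foldl (fun r k => if p k then PySem.Int.bxor r (g k) else r) init
      = (l.filter (fun k => decide (p k))).foldl (fun r k => PySem.Int.bxor r (g k)) init := by
  induction l generalizing init with
  | nil => rfl
  | cons x t ih =>
    simp only [List.foldl_cons, List.filter_cons]
    by_cases h : p x
    · simp [h, ih]
    · simp [h, ih]

-- the even numbers below L are exactly the doubles of the numbers below ⌈L/2⌉
theorem pv_range_filter_even (L : Nat) :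
    (List.range L).filter (fun k => k % 2 == 0) = (List.range ((L + 1) / 2)).map (2 * ·) := by
  induction L with
  | zero => rfl
  | succ m ih =>
    rw [List.range_succ, List.filter_append, ih]
    by_cases h : m % 2 = 0
    · have h2 : (m + 1 + 1) / 2 = (m + 1) / 2 + 1 := by omega
      rw [h2, List.range_succ, List.map_append]
      have h3 : 2 * ((m + 1) / 2) = m := by omega
      simp [h, h3]
    · have h2 : (m + 1 + 1) / 2 = (m + 1) / 2 := by omega
      rw [h2]
      simp [h]

theorem sansaXor_eq_alt (arr : List Int) : sansaXor arr = sansaXor_alt arr := by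
  unfold sansaXor sansaXor_alt
  simp only []
  have hlen : PySem.List.len arr = (arr.length : Int) := by simp [PySem.List.len]
  set L := arr.length with hL
  rw [hlen, PySem.List.pyRange_one, List.foldl_map]
  have hto : (((L : Int)) - 0).toNat = L := by omega
  rw [hto]
  rw [pv_foldl_if_filter (List.range L)
        (fun k => PySem.Int.mod ((0 + (k : Int) + 1) * ((L : Int) - (0 + (k : Int)))) 2 ≠ 0)
        (fun k => PySem.List.pyGetD arr (0 + (k : Int)) 0) 0]
  by_cases hpar : L % 2 = 0
  · -- even length: the guard never fires on A's side, B returns 0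
    have hmod : PySem.Int.mod (L : Int) 2 = 0 := by rw [pv_mod_two]; omega
    rw [if_pos hmod]
    have hfil : (List.range L).filter
        (fun (k : Nat) => decide (PySem.Int.mod ((0 + (k : Int) + 1) * ((L : Int) - (0 + (k : Int)))) 2 ≠ 0))
        = [] := by
      rw [List.filter_eq_nil_iff]
      intro k hk
      have hk' : k < L := List.mem_range.mp hk
      simp only [zero_add, pv_mod_two, decide_not, Bool.not_eq_true', decide_eq_false_iff_not,
        Decidable.not_not]
      exact (pv_parity L k hk').mpr (Or.inr hpar)
    rw [hfil]
    rfl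
  · -- odd length: A's guard fires exactly on even indices; B walks range(0, L, 2)
    have hmod : ¬ PySem.Int.mod (L : Int) 2 = 0 := by rw [pv_mod_two]; omega
    rw [if_neg hmod]
    have hfil : (List.range L).filter
        (fun (k : Nat) => decide (PySem.Int.mod ((0 + (k : Int) + 1) * ((L : Int) - (0 + (k : Int)))) 2 ≠ 0))
        = (List.range L).filter (fun (k : Nat) => k % 2 == 0) := by
      apply List.filter_congr
      intro k hk
      have hk' : k < L := List.mem_range.mp hk
      have hiff : ¬((((k : Int)) + 1) * ((L : Int) - (k : Int))) % 2 = 0 ↔ k % 2 = 0 := by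
        rw [pv_parity L k hk']; omega
      simp only [zero_add, pv_mod_two]
      simp only [hiff]
      by_cases h : k % 2 = 0 <;> simp [h]
    rw [hfil, pv_range_filter_even, List.foldl_map]
    have hpos : 0 < L := by omega
    have hrng : PySem.List.pyRange 0 (L : Int) 2
        = (List.range ((L + 1) / 2)).map (fun (k : Nat) => (0 : Int) + 2 * (k : Int)) := by
      rw [PySem.List.pyRange_of_pos 0 (L : Int) (by norm_num)]
      have h1 : (if (0 : Int) < (L : Int) then ((((L : Int)) - 0 + 2 - 1) / 2).toNat else 0)
          = (L + 1) / 2 := by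
        rw [if_pos (by exact_mod_cast hpos)]
        omega
      rw [h1]
    rw [hrng, List.foldl_map]
    push_cast
    rfl

-- ===== VERDICT (by name: the statement is the Claim_ definition above) =====
theorem sansaXor_spec : Claim_equal_sansaXor := by
  intro arr _
  unfold Spec_sansaXor
  exact sansaXor_eq_alt arr
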